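-- pv_equiv track=rewrite | github.com/Ledoux/LIF | Tool/PyTool.py | getCombi
-- ===== SOURCE A (Python) =====
-- import itertools
--
-- def getCombi(stuff):
-- 	subsubsubset=list();
-- 	for L in range(0, len(stuff)+1):
-- 		subsubset=list();
-- 		for subset in itertools.combinations(stuff, L):
-- 			subsubset.append(subset);
-- 		subsubsubset.append(subsubset);
-- 	return subsubsubset;
-- ===== SOURCE B (Python) =====
-- def _ne(seq):
--     # all NONEMPTY subsequences of seq, as tuples, in lexicographic-by-index order
--     if not seq:
--         return []
--     head, rest = seq[0], seq[1:]
--     tail = _ne(rest)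
--     return [(head,) + t for t in [()] + tail] + tail
--
--
-- def getCombi(stuff):
--     subs = [()] + _ne(list(stuff))
--     return [[c for c in subs if len(c) == L] for L in range(len(stuff) + 1)]
-- ===== Notes on version B (the rewrite author's own statement) =====
-- stated objective: alternative
-- what changed: Replaces the itertools.combinations double loop by a single recursive enumeration of all subsequences in index-lexicographic order, then groups them by length with a filter per length.
import Mathlib
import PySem

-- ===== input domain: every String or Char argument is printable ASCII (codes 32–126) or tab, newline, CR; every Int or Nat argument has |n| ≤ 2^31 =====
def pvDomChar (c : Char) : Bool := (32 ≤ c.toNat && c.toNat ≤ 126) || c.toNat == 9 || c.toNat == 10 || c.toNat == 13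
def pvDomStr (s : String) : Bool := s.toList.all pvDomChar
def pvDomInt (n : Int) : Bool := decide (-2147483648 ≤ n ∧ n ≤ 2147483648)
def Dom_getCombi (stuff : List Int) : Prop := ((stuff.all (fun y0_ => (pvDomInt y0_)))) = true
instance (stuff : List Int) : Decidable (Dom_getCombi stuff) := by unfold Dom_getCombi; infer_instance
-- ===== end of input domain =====

-- B replaces the itertools.combinations double loop by one recursive enumeration of all
-- subsequences in index-lexicographic order, grouped by length with a filter (alternative decomposition).

-- ===== PORT A =====
-- port of itertools.combinations(xs, n): tuples in lexicographic-by-index order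
def pyCombinations (xs : List Int) (n : Nat) : List (List Int) :=
  match n, xs with
  | 0, _ => [[]]
  | _ + 1, [] => []
  | n + 1, x :: t => (pyCombinations t n).map (x :: ·) ++ pyCombinations t (n + 1)

def getCombi (stuff : List Int) : List (List (List Int)) :=
  (PySem.List.pyRange 0 ((stuff.length : Int) + 1) 1).foldl
    (fun sss L =>
      sss ++ [(pyCombinations stuff L.toNat).foldl (fun ss c => ss ++ [c]) []]) []

-- ===== PORT B =====
-- all NONEMPTY subsequences, in lexicographic-by-index order (Source B's _ne)
def neSubs (seq : List Int) : List (List Int) :=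
  match seq with
  | [] => []
  | h :: rest =>
    let tail := neSubs rest
    (([] :: tail).map (h :: ·)) ++ tail

def getCombi_alt (stuff : List Int) : List (List (List Int)) :=
  let subs := [] :: neSubs stuff
  (List.range (stuff.length + 1)).map (fun L => subs.filter (fun c => c.length == L))

-- ===== PRECONDITION & SPEC =====
def Spec_getCombi (stuff : List Int) (out : List (List (List Int))) : Prop := out = getCombi_alt stuff
instance (stuff : List Int) (out : List (List (List Int))) : Decidable (Spec_getCombi stuff out) := by unfold Spec_getCombi; infer_instance

-- ===== CLAIM (what is proved, stated in full; the proofs are below) =====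
def Claim_equal_getCombi : Prop := ∀ (stuff : List Int), Dom_getCombi stuff → Spec_getCombi stuff (getCombi stuff)

-- ===== LEMMAS AND PROOFS =====

theorem foldl_snoc {α : Type} : ∀ (l : List α) (init : List α),
    l.foldl (fun ss c => ss ++ [c]) init = init ++ l := by
  intro l
  induction l with
  | nil => simp
  | cons x t ih => intro init; simp [List.foldl_cons, ih]

theorem foldl_snoc_map {α β : Type} (f : α → β) : ∀ (l : List α) (init : List β),
    l.foldl (fun acc x => acc ++ [f x]) init = init ++ l.map f := by
  intro l
  induction l with
  | nil => simp
  | cons x t ih => intro init; simp [List.foldl_cons, ih]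

theorem neSubs_ne_nil : ∀ (xs : List Int) (c : List Int), c ∈ neSubs xs → c ≠ [] := by
  intro xs
  induction xs with
  | nil => simp [neSubs]
  | cons h t ih =>
    intro c hc
    simp only [neSubs, List.mem_append, List.mem_map, List.mem_cons] at hc
    rcases hc with ⟨a, _, rfl⟩ | hc
    · simp
    · exact ih c hc

theorem combs_eq_filter : ∀ (xs : List Int) (L : Nat),
    pyCombinations xs L = ([] :: neSubs xs).filter (fun c => c.length == L) := by
  intro xs
  induction xs with
  | nil =>
    intro L
    cases L with
    | zero => simp [pyCombinations, neSubs]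
    | succ n => simp [pyCombinations, neSubs]
  | cons h t ih =>
    intro L
    cases L with
    | zero =>
      have h1 : (([] :: neSubs t).map (h :: ·)).filter (fun c => c.length == 0) = [] := by
        rw [List.filter_map]
        simp
      have h2 : (neSubs t).filter (fun c => c.length == 0) = [] := by
        rw [List.filter_eq_nil_iff]
        intro c hc
        have := neSubs_ne_nil t c hc
        simpa [List.length_eq_zero_iff] using this
      show [[]] = ([] :: ((([] :: neSubs t).map (h :: ·)) ++ neSubs t)).filter (fun c => c.length == 0)
      rw [List.filter_cons_of_pos (by simp), List.filter_append, h1, h2]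
      rfl
    | succ n =>
      have h1 : (([] :: neSubs t).map (h :: ·)).filter (fun c => c.length == n + 1)
          = (pyCombinations t n).map (h :: ·) := by
        rw [List.filter_map, ih n]
        congr 1
        apply List.filter_congr
        intro c _
        simp
      have h2 : (neSubs t).filter (fun c => c.length == n + 1) = pyCombinations t (n + 1) := by
        rw [ih (n + 1)]
        rw [List.filter_cons_of_neg (by simp)]
      show (pyCombinations t n).map (h :: ·) ++ pyCombinations t (n + 1)
          = ([] :: ((([] :: neSubs t).map (h :: ·)) ++ neSubs t)).filter (fun c => c.length == n + 1)
      rw [List.filter_cons_of_neg (by simp), List.filter_append, h1, h2]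

theorem pyRange_len (n : Nat) :
    PySem.List.pyRange 0 ((n : Int) + 1) 1 = (List.range (n + 1)).map Int.ofNat := by
  rw [PySem.List.pyRange_one]
  have : (((n : Int) + 1) - 0).toNat = n + 1 := by omega
  rw [this]
  exact List.map_congr_left (fun k _ => by simp [Int.ofNat_eq_natCast])

-- ===== VERDICT (by name: the statement is the Claim_ definition above) =====
theorem getCombi_spec : Claim_equal_getCombi := by
  intro stuff _
  unfold Spec_getCombi getCombi getCombi_alt
  rw [pyRange_len stuff.length, List.foldl_map, foldl_snoc_map, List.nil_append]
  apply List.map_congr_left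
  intro L _
  rw [foldl_snoc, List.nil_append, show (Int.ofNat L).toNat = L from rfl]
  exact combs_eq_filter stuff L
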